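-- pv_equiv track=rewrite | github.com/Kolyan78/P101 | Занятие4/Лабораторные_задания/task1_5/main.py | ev_o_no
-- ===== SOURCE A (Python) =====
-- def ev_o_no(lst):
--     even = len([x for x in lst if x % 2 == 0])
--     odd = len([x for x in lst if x % 2 != 0])
--     if even > odd:
--         return "четных больше"
--     elif even < odd:
--         return "нечетных больше"
--     return "равны"
-- ===== SOURCE B (Python) =====
-- def ev_o_no(lst):
--     bal = 0
--     for x in lst:
--         bal += 1 if x % 2 == 0 else -1
--     if bal > 0:
--         return "четных больше"
--     if bal < 0:
--         return "нечетных больше"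
--     return "равны"
-- ===== Notes on version B (the rewrite author's own statement) =====
-- stated objective: simpler
-- what changed: Replaces two list comprehensions and two materialized lists with a single pass maintaining one integer balance (+1 even, -1 odd), then compares the sign of the balance.
import Mathlib
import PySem

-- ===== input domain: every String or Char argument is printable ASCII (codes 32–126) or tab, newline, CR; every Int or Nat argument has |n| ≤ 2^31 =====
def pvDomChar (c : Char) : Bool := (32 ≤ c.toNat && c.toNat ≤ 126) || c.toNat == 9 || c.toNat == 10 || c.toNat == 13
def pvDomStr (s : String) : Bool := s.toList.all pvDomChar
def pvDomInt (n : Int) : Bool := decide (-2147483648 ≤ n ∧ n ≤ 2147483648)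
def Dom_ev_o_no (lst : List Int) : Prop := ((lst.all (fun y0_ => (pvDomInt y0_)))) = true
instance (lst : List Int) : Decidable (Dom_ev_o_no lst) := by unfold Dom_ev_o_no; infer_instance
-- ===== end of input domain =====

-- B fuses A's two comprehensions into one pass with a single integer balance (simpler, O(1) space).
-- ===== PORT A =====
def ev_o_no (lst : List Int) : String :=
  let even : Int := (lst.filter (fun x => PySem.Int.mod x 2 == 0)).length
  let odd : Int := (lst.filter (fun x => PySem.Int.mod x 2 != 0)).length
  if even > odd then "четных больше"
  else if even < odd then "нечетных больше"
  else "равны"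

-- ===== PORT B =====
def ev_o_no_alt (lst : List Int) : String :=
  let bal : Int := lst.foldl (fun b x => b + (if PySem.Int.mod x 2 == 0 then 1 else -1)) 0
  if bal > 0 then "четных больше"
  else if bal < 0 then "нечетных больше"
  else "равны"

-- ===== PRECONDITION & SPEC =====
def Spec_ev_o_no (lst : List Int) (out : String) : Prop := out = ev_o_no_alt lst
instance (lst : List Int) (out : String) : Decidable (Spec_ev_o_no lst out) := by unfold Spec_ev_o_no; infer_instance

-- ===== CLAIM (what is proved, stated in full; the proofs are below) =====
def Claim_equal_ev_o_no : Prop := ∀ (lst : List Int), Dom_ev_o_no lst → Spec_ev_o_no lst (ev_o_no lst)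

-- ===== LEMMAS AND PROOFS =====

-- The balance equals (#evens − #odds), for any starting accumulator.
theorem bal_eq (lst : List Int) (b : Int) :
    lst.foldl (fun b x => b + (if PySem.Int.mod x 2 == 0 then 1 else -1)) b
      = b + ((lst.filter (fun x => PySem.Int.mod x 2 == 0)).length : Int)
          - ((lst.filter (fun x => PySem.Int.mod x 2 != 0)).length : Int) := by
  induction lst generalizing b with
  | nil => simp
  | cons x xs ih =>
    simp only [List.foldl_cons, List.filter_cons, bne, ih]
    cases h : (PySem.Int.mod x 2 == 0) <;>
      simp only [h, Bool.not_true, Bool.not_false, if_true, if_false, List.length_cons] <;>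
      push_cast <;> ring

-- ===== VERDICT (by name: the statement is the Claim_ definition above) =====
theorem ev_o_no_spec : Claim_equal_ev_o_no := by
  intro lst _
  unfold Spec_ev_o_no ev_o_no ev_o_no_alt
  simp only [bal_eq]
  split_ifs <;> first | rfl | omega
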